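-- pv_equiv track=rewrite | github.com/Tylereck81/Polygame- | connect6.py | determine_position
-- ===== SOURCE A (Python) =====
-- squaresize = 40
--
-- y_offset = 50
--
-- x_offset = 200
--
-- def determine_position(position_x, position_y):
--     x=''
--     y=''
--     n1 = 0
--     n2 = 1
--     l = 'a'
--     flag = 1
--     while(flag == 1): #checks x coordinate
--         if position_x >= n1*squaresize+x_offset-20 and position_x<=n2*squaresize+x_offset-20:
--             x = l;
--             flag = 0
--         else:
--             n1+=1
--             n2+=1
--             l = chr(ord(l)+1)
--         if (n2>19):
--             break
--
--     n1 = 0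
--     n2 = 1
--     l = 19
--     flag = 1
--     while(flag == 1): #checks y coordinate
--         if position_y >= n1*squaresize+y_offset-20 and position_y<=n2*squaresize+y_offset-20:
--             y = l;
--             flag = 0
--         else:
--             n1+=1
--             n2+=1
--             l -=1
--         if (n2>19):
--             break
--     if x =="" or y =="":
--         x = ""
--         y = ""
--
--     return x+str(y)
-- ===== SOURCE B (Python) =====
-- def determine_position(position_x, position_y):
--     # Direct arithmetic inversion of the interval grid instead of two scan loops.
--     if 180 <= position_x <= 940 and 30 <= position_y <= 790:
--         i = (position_x - 181) // 40 if position_x > 180 else 0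
--         j = (position_y - 31) // 40 if position_y > 30 else 0
--         return chr(97 + i) + str(19 - j)
--     return ''
-- ===== Notes on version B (the rewrite author's own statement) =====
-- stated objective: simpler
-- what changed: Replaces the two incremental 19-step interval-scan while-loops with a direct range check and closed-form integer division inverting the cell formula.
import Mathlib
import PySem

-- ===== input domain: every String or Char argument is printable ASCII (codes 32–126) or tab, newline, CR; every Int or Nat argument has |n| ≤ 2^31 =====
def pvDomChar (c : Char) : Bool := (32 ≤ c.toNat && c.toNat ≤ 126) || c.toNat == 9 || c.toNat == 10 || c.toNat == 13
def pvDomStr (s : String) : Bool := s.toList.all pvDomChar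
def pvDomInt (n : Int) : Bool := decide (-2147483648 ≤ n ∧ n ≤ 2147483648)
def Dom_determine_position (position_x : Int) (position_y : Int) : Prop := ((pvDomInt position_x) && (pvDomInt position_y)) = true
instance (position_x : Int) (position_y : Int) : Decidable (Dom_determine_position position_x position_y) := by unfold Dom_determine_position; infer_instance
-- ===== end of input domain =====

-- B replaces A's two incremental 19-step interval-scan loops by a direct range check
-- and a closed-form integer division (simpler decomposition, same exact results).


-- ===== PORT A =====
-- the x-coordinate while loop: state (n1, n2, l), flag=0 modelled by returning `some l`,
-- the `if n2 > 19: break` (leaving x = '') by `none`; fuel 19 covers the at most 19 iterations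
def detXLoop (px : Int) : Nat → Int → Int → Char → Option Char
  | 0, _, _, _ => none
  | f+1, n1, n2, l =>
    if n1 * 40 + 200 - 20 ≤ px ∧ px ≤ n2 * 40 + 200 - 20 then some l
    else if 19 < n2 + 1 then none
    else detXLoop px f (n1 + 1) (n2 + 1) (Char.ofNat (l.toNat + 1))

-- the y-coordinate while loop, label l an integer counting down from 19
def detYLoop (py : Int) : Nat → Int → Int → Int → Option Int
  | 0, _, _, _ => none
  | f+1, n1, n2, l =>
    if n1 * 40 + 50 - 20 ≤ py ∧ py ≤ n2 * 40 + 50 - 20 then some l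
    else if 19 < n2 + 1 then none
    else detYLoop py f (n1 + 1) (n2 + 1) (l - 1)

def determine_position (position_x : Int) (position_y : Int) : String :=
  match detXLoop position_x 19 0 1 'a', detYLoop position_y 19 0 1 19 with
  | some c, some m => String.mk [c] ++ PySem.Int.toStr m   -- x + str(y)
  | _, _ => ""                                             -- x or y empty: both cleared

-- ===== PORT B =====
def determine_position_alt (position_x : Int) (position_y : Int) : String :=
  if 180 ≤ position_x ∧ position_x ≤ 940 ∧ 30 ≤ position_y ∧ position_y ≤ 790 then
    String.mk [Char.ofNat (97 + (if 180 < position_x then PySem.Int.floordiv (position_x - 181) 40 else 0).toNat)]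
      ++ PySem.Int.toStr (19 - (if 30 < position_y then PySem.Int.floordiv (position_y - 31) 40 else 0))
  else ""

-- ===== PRECONDITION & SPEC =====
def Spec_determine_position (position_x : Int) (position_y : Int) (out : String) : Prop := out = determine_position_alt position_x position_y
instance (position_x : Int) (position_y : Int) (out : String) : Decidable (Spec_determine_position position_x position_y out) := by unfold Spec_determine_position; infer_instance

-- ===== CLAIM (what is proved, stated in full; the proofs are below) =====
def Claim_equal_determine_position : Prop := ∀ (position_x : Int) (position_y : Int), Dom_determine_position position_x position_y → Spec_determine_position position_x position_y (determine_position position_x position_y)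

-- ===== LEMMAS AND PROOFS =====

-- the closed-form cell indices (proof-side abbreviations, ediv form)
def IxV (px : Int) : Int := if 180 < px then (px - 181) / 40 else 0
def JyV (py : Int) : Int := if 30 < py then (py - 31) / 40 else 0

lemma char_toNat_small (n : Nat) (h : n ≤ 200) : (Char.ofNat n).toNat = n := by
  rw [Char.toNat_ofNat, if_pos]; exact Or.inl (by omega)

lemma detXLoop_spec (px : Int) : ∀ (f n1 : Nat) (l : Char),
    n1 + f = 19 → n1 ≤ 18 → l = Char.ofNat (97 + n1) →
    detXLoop px f (n1 : Int) ((n1 : Int) + 1) l =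
      if (n1 : Int) * 40 + 180 ≤ px ∧ px ≤ 940 then
        some (Char.ofNat (97 + (max (n1 : Int) (IxV px)).toNat))
      else none := by
  intro f
  induction f with
  | zero => intro n1 l h1 h2 _; exfalso; omega
  | succ f ih =>
    intro n1 l h1 h2 hl
    simp only [detXLoop]
    by_cases hm : (n1 : Int) * 40 + 200 - 20 ≤ px ∧ px ≤ ((n1 : Int) + 1) * 40 + 200 - 20
    · rw [if_pos hm, if_pos (show (n1 : Int) * 40 + 180 ≤ px ∧ px ≤ 940 by omega)]
      have hmax : (max (n1 : Int) (IxV px)).toNat = n1 := by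
        simp only [IxV]; split_ifs <;> omega
      rw [hmax, hl]
    · rw [if_neg hm]
      by_cases hb : (19 : Int) < (n1 : Int) + 1 + 1
      · rw [if_pos hb, if_neg (show ¬((n1 : Int) * 40 + 180 ≤ px ∧ px ≤ 940) by omega)]
      · rw [if_neg hb]
        have harg : Char.ofNat (l.toNat + 1) = Char.ofNat (97 + (n1 + 1)) := by
          rw [hl, char_toNat_small (97 + n1) (by omega), Nat.add_assoc]
        have hrec := ih (n1 + 1) (Char.ofNat (97 + (n1 + 1))) (by omega) (by omega) rfl
        push_cast at hrec
        rw [harg, hrec]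
        by_cases hA : (n1 : Int) * 40 + 180 ≤ px ∧ px ≤ 940
        · rw [if_pos hA, if_pos (show ((n1 : Int) + 1) * 40 + 180 ≤ px ∧ px ≤ 940 by omega)]
          have : (max ((n1 : Int) + 1) (IxV px)).toNat = (max (n1 : Int) (IxV px)).toNat := by
            simp only [IxV]; split_ifs <;> omega
          rw [this]
        · rw [if_neg hA, if_neg (show ¬(((n1 : Int) + 1) * 40 + 180 ≤ px ∧ px ≤ 940) by omega)]

lemma detYLoop_spec (py : Int) : ∀ (f n1 : Nat) (l : Int),
    n1 + f = 19 → n1 ≤ 18 → l = 19 - (n1 : Int) →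
    detYLoop py f (n1 : Int) ((n1 : Int) + 1) l =
      if (n1 : Int) * 40 + 30 ≤ py ∧ py ≤ 790 then
        some (19 - max (n1 : Int) (JyV py))
      else none := by
  intro f
  induction f with
  | zero => intro n1 l h1 h2 _; exfalso; omega
  | succ f ih =>
    intro n1 l h1 h2 hl
    simp only [detYLoop]
    by_cases hm : (n1 : Int) * 40 + 50 - 20 ≤ py ∧ py ≤ ((n1 : Int) + 1) * 40 + 50 - 20
    · rw [if_pos hm, if_pos (show (n1 : Int) * 40 + 30 ≤ py ∧ py ≤ 790 by omega)]
      have hmax : max (n1 : Int) (JyV py) = (n1 : Int) := by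
        simp only [JyV]; split_ifs <;> omega
      rw [hmax, hl]
    · rw [if_neg hm]
      by_cases hb : (19 : Int) < (n1 : Int) + 1 + 1
      · rw [if_pos hb, if_neg (show ¬((n1 : Int) * 40 + 30 ≤ py ∧ py ≤ 790) by omega)]
      · rw [if_neg hb]
        have hrec := ih (n1 + 1) (19 - ((n1 : Int) + 1)) (by omega) (by omega) (by push_cast; ring)
        push_cast at hrec
        rw [show l - 1 = 19 - ((n1 : Int) + 1) by omega, hrec]
        by_cases hA : (n1 : Int) * 40 + 30 ≤ py ∧ py ≤ 790
        · rw [if_pos hA, if_pos (show ((n1 : Int) + 1) * 40 + 30 ≤ py ∧ py ≤ 790 by omega)]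
          have : max ((n1 : Int) + 1) (JyV py) = max (n1 : Int) (JyV py) := by
            simp only [JyV]; split_ifs <;> omega
          rw [this]
        · rw [if_neg hA, if_neg (show ¬(((n1 : Int) + 1) * 40 + 30 ≤ py ∧ py ≤ 790) by omega)]

lemma detXLoop_closed (px : Int) :
    detXLoop px 19 0 1 'a' =
      if 180 ≤ px ∧ px ≤ 940 then some (Char.ofNat (97 + (max 0 (IxV px)).toNat)) else none := by
  have h := detXLoop_spec px 19 0 'a' (by norm_num) (by norm_num) (by decide)
  norm_num at h
  exact h

lemma detYLoop_closed (py : Int) :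
    detYLoop py 19 0 1 19 =
      if 30 ≤ py ∧ py ≤ 790 then some (19 - max 0 (JyV py)) else none := by
  have h := detYLoop_spec py 19 0 19 (by norm_num) (by norm_num) (by norm_num)
  norm_num at h
  exact h

-- ===== VERDICT (by name: the statement is the Claim_ definition above) =====
theorem determine_position_spec : Claim_equal_determine_position := by
  unfold Claim_equal_determine_position Spec_determine_position
  intro px py _
  unfold determine_position determine_position_alt
  rw [detXLoop_closed, detYLoop_closed]
  by_cases hX : 180 ≤ px ∧ px ≤ 940
  · by_cases hY : 30 ≤ py ∧ py ≤ 790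
    · rw [if_pos hX, if_pos hY, if_pos ⟨hX.1, hX.2, hY.1, hY.2⟩]
      have h1 : (max 0 (IxV px)).toNat
          = (if 180 < px then PySem.Int.floordiv (px - 181) 40 else 0).toNat := by
        rw [show PySem.Int.floordiv (px - 181) 40 = (px - 181) / 40 from
          PySem.Int.floordiv_eq_ediv_of_pos (by norm_num)]
        simp only [IxV]; split_ifs <;> omega
      have h2 : (19 : Int) - max 0 (JyV py)
          = 19 - (if 30 < py then PySem.Int.floordiv (py - 31) 40 else 0) := by
        rw [show PySem.Int.floordiv (py - 31) 40 = (py - 31) / 40 from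
          PySem.Int.floordiv_eq_ediv_of_pos (by norm_num)]
        simp only [JyV]; split_ifs <;> omega
      rw [h1, h2]
    · rw [if_pos hX, if_neg hY,
        if_neg (show ¬(180 ≤ px ∧ px ≤ 940 ∧ 30 ≤ py ∧ py ≤ 790) from fun h => hY ⟨h.2.2.1, h.2.2.2⟩)]
  · rw [if_neg hX,
      if_neg (show ¬(180 ≤ px ∧ px ≤ 940 ∧ 30 ≤ py ∧ py ≤ 790) from fun h => hX ⟨h.1, h.2.1⟩)]
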